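-- pv_equiv track=rewrite | github.com/JasperZebra/AVATAR-Save-Editor | maps_manager.py | _get_biome_type
-- ===== SOURCE A (Python) =====
-- def _get_biome_type(map_name):
--     """Determine biome type based on map name"""
--     name_lower = map_name.lower()
--
--     if any(keyword in name_lower for keyword in ['forest', 'jungle', 'grove', 'tree']):
--         return "Forest"
--     elif any(keyword in name_lower for keyword in ['swamp', 'bog', 'marsh']):
--         return "Wetland"
--     elif any(keyword in name_lower for keyword in ['plain', 'valley', 'field']):
--         return "Grassland"
--     elif any(keyword in name_lower for keyword in ['mountain', 'peak', 'cliff']):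
--         return "Mountain"
--     elif any(keyword in name_lower for keyword in ['cave', 'cavern', 'underground']):
--         return "Subterranean"
--     elif any(keyword in name_lower for keyword in ['water', 'river', 'lake', 'lagoon']):
--         return "Aquatic"
--     elif any(keyword in name_lower for keyword in ['desert', 'arid', 'dry']):
--         return "Desert"
--     else:
--         return "Mixed"
-- ===== SOURCE B (Python) =====
-- _KEYWORD_PRIORITY = {
--     'forest': 0, 'jungle': 0, 'grove': 0, 'tree': 0,
--     'swamp': 1, 'bog': 1, 'marsh': 1,
--     'plain': 2, 'valley': 2, 'field': 2,
--     'mountain': 3, 'peak': 3, 'cliff': 3,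
--     'cave': 4, 'cavern': 4, 'underground': 4,
--     'water': 5, 'river': 5, 'lake': 5, 'lagoon': 5,
--     'desert': 6, 'arid': 6, 'dry': 6,
-- }
-- _BIOMES = ["Forest", "Wetland", "Grassland", "Mountain",
--            "Subterranean", "Aquatic", "Desert"]
--
-- def _get_biome_type(map_name):
--     """Single left-to-right scan over string positions, keeping the
--     minimum priority of any keyword that starts at a position."""
--     name_lower = map_name.lower()
--     best = len(_BIOMES)
--     for i in range(len(name_lower)):
--         for kw, pr in _KEYWORD_PRIORITY.items():
--             if pr < best and name_lower.startswith(kw, i):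
--                 best = pr
--     return _BIOMES[best] if best < len(_BIOMES) else "Mixed"
-- ===== Notes on version B (the rewrite author's own statement) =====
-- stated objective: alternative
-- what changed: Replaced the per-biome substring cascade with a single scan over string positions: a flat keyword-to-priority dict is checked with startswith at each index and a min-priority accumulator picks the highest-priority biome, indexed from a biome list at the end.
import Mathlib
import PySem

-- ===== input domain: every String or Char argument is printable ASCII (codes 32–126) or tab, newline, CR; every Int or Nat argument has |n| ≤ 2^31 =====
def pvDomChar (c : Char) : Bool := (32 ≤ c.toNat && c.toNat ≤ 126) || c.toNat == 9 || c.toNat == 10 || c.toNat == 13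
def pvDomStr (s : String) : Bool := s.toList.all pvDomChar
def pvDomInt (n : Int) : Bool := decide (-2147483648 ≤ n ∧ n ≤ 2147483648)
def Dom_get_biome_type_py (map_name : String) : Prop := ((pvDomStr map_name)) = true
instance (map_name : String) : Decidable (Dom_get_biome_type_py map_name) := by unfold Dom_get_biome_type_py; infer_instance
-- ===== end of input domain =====

-- B replaces the per-biome substring cascade by a single scan over string positions with a flat keyword->priority table and a min-priority accumulator (alternative algorithm, similar cost).


-- ===== PORT A =====
def get_biome_type_py (map_name : String) : String :=
  let name_lower := PySem.Str.lower map_name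
  if (["forest", "jungle", "grove", "tree"] : List String).any (fun k => PySem.Str.isIn k name_lower) then "Forest"
  else if (["swamp", "bog", "marsh"] : List String).any (fun k => PySem.Str.isIn k name_lower) then "Wetland"
  else if (["plain", "valley", "field"] : List String).any (fun k => PySem.Str.isIn k name_lower) then "Grassland"
  else if (["mountain", "peak", "cliff"] : List String).any (fun k => PySem.Str.isIn k name_lower) then "Mountain"
  else if (["cave", "cavern", "underground"] : List String).any (fun k => PySem.Str.isIn k name_lower) then "Subterranean"
  else if (["water", "river", "lake", "lagoon"] : List String).any (fun k => PySem.Str.isIn k name_lower) then "Aquatic"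
  else if (["desert", "arid", "dry"] : List String).any (fun k => PySem.Str.isIn k name_lower) then "Desert"
  else "Mixed"

-- ===== PORT B =====
-- the flat _KEYWORD_PRIORITY dict of Source B (insertion order), keywords as char lists
def pvKwPr : List (List Char × Nat) :=
  [("forest".toList, 0), ("jungle".toList, 0), ("grove".toList, 0), ("tree".toList, 0),
   ("swamp".toList, 1), ("bog".toList, 1), ("marsh".toList, 1),
   ("plain".toList, 2), ("valley".toList, 2), ("field".toList, 2),
   ("mountain".toList, 3), ("peak".toList, 3), ("cliff".toList, 3),
   ("cave".toList, 4), ("cavern".toList, 4), ("underground".toList, 4),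
   ("water".toList, 5), ("river".toList, 5), ("lake".toList, 5), ("lagoon".toList, 5),
   ("desert".toList, 6), ("arid".toList, 6), ("dry".toList, 6)]

def pvBiomes : List String :=
  ["Forest", "Wetland", "Grassland", "Mountain", "Subterranean", "Aquatic", "Desert"]

-- the inner dict loop of Source B at position i: keep the smaller priority of any keyword starting at i
-- (Python's name_lower.startswith(kw, i) with 0 ≤ i < len is exact as startswith on the drop)
def pvInner (nl : List Char) (i : Int) (b : Nat) : Nat :=
  pvKwPr.foldl (fun b kp =>
    if kp.2 < b ∧ PySem.Chars.startswith (nl.drop i.toNat) kp.1 = true then kp.2 else b) b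

def get_biome_type_py_alt (map_name : String) : String :=
  let nl := (PySem.Str.lower map_name).toList
  let best := (PySem.List.pyRange 0 nl.length 1).foldl (fun b i => pvInner nl i b) pvBiomes.length
  -- _BIOMES[best] under the guard best < len(_BIOMES): always in range, so getD is exact
  if best < pvBiomes.length then pvBiomes.getD best "Mixed" else "Mixed"

-- ===== PRECONDITION & SPEC =====
def Spec_get_biome_type_py (map_name : String) (out : String) : Prop := out = get_biome_type_py_alt map_name
instance (map_name : String) (out : String) : Decidable (Spec_get_biome_type_py map_name out) := by unfold Spec_get_biome_type_py; infer_instance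

-- ===== CLAIM (what is proved, stated in full; the proofs are below) =====
def Claim_equal_get_biome_type_py : Prop := ∀ (map_name : String), Dom_get_biome_type_py map_name → Spec_get_biome_type_py map_name (get_biome_type_py map_name)

-- ===== LEMMAS AND PROOFS =====

-- "priority p is matched": some table keyword of priority p starts at some scanned position
def pvP (nl : List Char) (p : Nat) : Prop :=
  ∃ kp ∈ pvKwPr, kp.2 = p ∧ ∃ i ∈ PySem.List.pyRange 0 (nl.length : Int) 1,
    PySem.Chars.startswith (nl.drop i.toNat) kp.1 = true

-- generic facts about the inner min-accumulating fold, over an arbitrary keyword list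
theorem pvFold_le (nl : List Char) (i : Int) (l : List (List Char × Nat)) (b : Nat) :
    l.foldl (fun b kp =>
      if kp.2 < b ∧ PySem.Chars.startswith (nl.drop i.toNat) kp.1 = true then kp.2 else b) b ≤ b := by
  induction l generalizing b with
  | nil => simp
  | cons kp rest ih =>
    simp only [List.foldl_cons]
    split_ifs with h
    · exact le_trans (ih _) (le_of_lt h.1)
    · exact ih b

theorem pvFold_mem_le (nl : List Char) (i : Int) (l : List (List Char × Nat))
    (kp : List Char × Nat) (hmem : kp ∈ l)
    (hsw : PySem.Chars.startswith (nl.drop i.toNat) kp.1 = true) (b : Nat) :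
    l.foldl (fun b kp =>
      if kp.2 < b ∧ PySem.Chars.startswith (nl.drop i.toNat) kp.1 = true then kp.2 else b) b ≤ kp.2 := by
  induction l generalizing b with
  | nil => cases hmem
  | cons hd rest ih =>
    simp only [List.foldl_cons]
    rcases List.mem_cons.mp hmem with heq | hrest
    · subst heq
      split_ifs with h
      · exact pvFold_le nl i rest kp.2
      · have hge : ¬ kp.2 < b := fun hlt => h ⟨hlt, hsw⟩
        exact le_trans (pvFold_le nl i rest b) (by omega)
    · exact ih hrest _

theorem pvFold_cases (nl : List Char) (i : Int) (l : List (List Char × Nat)) (b : Nat) :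
    l.foldl (fun b kp =>
      if kp.2 < b ∧ PySem.Chars.startswith (nl.drop i.toNat) kp.1 = true then kp.2 else b) b = b ∨
    ∃ kp ∈ l, PySem.Chars.startswith (nl.drop i.toNat) kp.1 = true ∧
      l.foldl (fun b kp =>
        if kp.2 < b ∧ PySem.Chars.startswith (nl.drop i.toNat) kp.1 = true then kp.2 else b) b = kp.2 := by
  induction l generalizing b with
  | nil => left; rfl
  | cons hd rest ih =>
    simp only [List.foldl_cons]
    rcases ih (if hd.2 < b ∧ PySem.Chars.startswith (nl.drop i.toNat) hd.1 = true then hd.2 else b) with h | ⟨kp, hkp, hsw, heq⟩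
    · by_cases hc : hd.2 < b ∧ PySem.Chars.startswith (nl.drop i.toNat) hd.1 = true
      · right
        exact ⟨hd, List.mem_cons_self, hc.2, by rw [h, if_pos hc]⟩
      · left
        rw [h, if_neg hc]
    · right
      exact ⟨kp, List.mem_cons_of_mem _ hkp, hsw, heq⟩

theorem pvInner_le (nl : List Char) (i : Int) (b : Nat) : pvInner nl i b ≤ b :=
  pvFold_le nl i pvKwPr b

theorem pvInner_mem_le (nl : List Char) (i : Int) (kp : List Char × Nat) (hmem : kp ∈ pvKwPr)
    (hsw : PySem.Chars.startswith (nl.drop i.toNat) kp.1 = true) (b : Nat) :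
    pvInner nl i b ≤ kp.2 :=
  pvFold_mem_le nl i pvKwPr kp hmem hsw b

theorem pvInner_cases (nl : List Char) (i : Int) (b : Nat) :
    pvInner nl i b = b ∨ ∃ kp ∈ pvKwPr,
      PySem.Chars.startswith (nl.drop i.toNat) kp.1 = true ∧ pvInner nl i b = kp.2 :=
  pvFold_cases nl i pvKwPr b

-- facts about the outer scan over an arbitrary index list
theorem pvScan_le (nl : List Char) (idxs : List Int) (b : Nat) :
    idxs.foldl (fun b i => pvInner nl i b) b ≤ b := by
  induction idxs generalizing b with
  | nil => simp
  | cons i rest ih =>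
    simp only [List.foldl_cons]
    exact le_trans (ih _) (pvInner_le nl i b)

theorem pvScan_mem_le (nl : List Char) (idxs : List Int)
    (i : Int) (hi : i ∈ idxs) (kp : List Char × Nat) (hmem : kp ∈ pvKwPr)
    (hsw : PySem.Chars.startswith (nl.drop i.toNat) kp.1 = true) (b : Nat) :
    idxs.foldl (fun b i => pvInner nl i b) b ≤ kp.2 := by
  induction idxs generalizing b with
  | nil => cases hi
  | cons j rest ih =>
    simp only [List.foldl_cons]
    rcases List.mem_cons.mp hi with heq | hrest
    · subst heq
      exact le_trans (pvScan_le nl rest _) (pvInner_mem_le nl i kp hmem hsw b)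
    · exact ih hrest _

theorem pvScan_cases (nl : List Char) (idxs : List Int) (b : Nat) :
    idxs.foldl (fun b i => pvInner nl i b) b = b ∨
    ∃ i ∈ idxs, ∃ kp ∈ pvKwPr, kp.2 = idxs.foldl (fun b i => pvInner nl i b) b ∧
      PySem.Chars.startswith (nl.drop i.toNat) kp.1 = true := by
  induction idxs generalizing b with
  | nil => left; rfl
  | cons j rest ih =>
    simp only [List.foldl_cons]
    rcases ih (pvInner nl j b) with h | ⟨i, hi, kp, hkp, heq, hsw⟩
    · rcases pvInner_cases nl j b with h2 | ⟨kp, hkp, hsw, heq⟩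
      · left; rw [h, h2]
      · right
        exact ⟨j, List.mem_cons_self, kp, hkp, by rw [h, heq], hsw⟩
    · right
      exact ⟨i, List.mem_cons_of_mem _ hi, kp, hkp, heq, hsw⟩

-- a position-bounded startswith match is exactly a substring match (for nonempty keywords)
theorem pvMatch_iff_isIn (nl kw : List Char) (hne : kw ≠ []) :
    (∃ i ∈ PySem.List.pyRange 0 (nl.length : Int) 1,
      PySem.Chars.startswith (nl.drop i.toNat) kw = true) ↔ PySem.Chars.isIn kw nl = true := by
  constructor
  · rintro ⟨i, _, hsw⟩
    rw [← PySem.Chars.exists_prefix_drop_iff_isIn kw nl]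
    exact ⟨i.toNat, (PySem.Chars.startswith_iff _ _).mp hsw⟩
  · intro hin
    rcases (PySem.Chars.exists_prefix_drop_iff_isIn kw nl).mpr hin with ⟨j, hpre⟩
    by_cases hj : j < nl.length
    · refine ⟨(j : Int), ?_, ?_⟩
      · rw [PySem.List.mem_pyRange_one]
        constructor <;> omega
      · rw [PySem.Chars.startswith_iff]
        simpa using hpre
    · exfalso
      rw [List.drop_eq_nil_of_le (by omega)] at hpre
      exact hne (List.prefix_nil.mp hpre)

-- pvP at priority p is exactly "some keyword of the group is a substring"
theorem pvP_iff_group (s : String) (p : Nat) (kws : List String)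
    (hforward : ∀ kp ∈ pvKwPr, kp.2 = p → kp.1 ∈ kws.map String.toList)
    (hback : ∀ k ∈ kws, (k.toList, p) ∈ pvKwPr)
    (hne : ∀ k ∈ kws, k.toList ≠ []) :
    pvP s.toList p ↔ kws.any (fun k => PySem.Str.isIn k s) = true := by
  unfold pvP
  rw [List.any_eq_true]
  constructor
  · rintro ⟨kp, hkp, hp, hex⟩
    rcases List.mem_map.mp (hforward kp hkp hp) with ⟨k, hk, hkeq⟩
    refine ⟨k, hk, ?_⟩
    have hin := (pvMatch_iff_isIn s.toList kp.1 (by rw [← hkeq]; exact hne k hk)).mp hex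
    rw [← hkeq] at hin
    simpa using hin
  · rintro ⟨k, hk, hin⟩
    refine ⟨(k.toList, p), hback k hk, rfl, ?_⟩
    exact (pvMatch_iff_isIn s.toList k.toList (hne k hk)).mpr (by simpa using hin)

theorem pvP0_iff (s : String) : pvP s.toList 0 ↔
    (["forest", "jungle", "grove", "tree"] : List String).any (fun k => PySem.Str.isIn k s) = true :=
  pvP_iff_group s 0 _ (by decide) (by decide) (by decide)

theorem pvP1_iff (s : String) : pvP s.toList 1 ↔
    (["swamp", "bog", "marsh"] : List String).any (fun k => PySem.Str.isIn k s) = true :=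
  pvP_iff_group s 1 _ (by decide) (by decide) (by decide)

theorem pvP2_iff (s : String) : pvP s.toList 2 ↔
    (["plain", "valley", "field"] : List String).any (fun k => PySem.Str.isIn k s) = true :=
  pvP_iff_group s 2 _ (by decide) (by decide) (by decide)

theorem pvP3_iff (s : String) : pvP s.toList 3 ↔
    (["mountain", "peak", "cliff"] : List String).any (fun k => PySem.Str.isIn k s) = true :=
  pvP_iff_group s 3 _ (by decide) (by decide) (by decide)

theorem pvP4_iff (s : String) : pvP s.toList 4 ↔
    (["cave", "cavern", "underground"] : List String).any (fun k => PySem.Str.isIn k s) = true :=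
  pvP_iff_group s 4 _ (by decide) (by decide) (by decide)

theorem pvP5_iff (s : String) : pvP s.toList 5 ↔
    (["water", "river", "lake", "lagoon"] : List String).any (fun k => PySem.Str.isIn k s) = true :=
  pvP_iff_group s 5 _ (by decide) (by decide) (by decide)

theorem pvP6_iff (s : String) : pvP s.toList 6 ↔
    (["desert", "arid", "dry"] : List String).any (fun k => PySem.Str.isIn k s) = true :=
  pvP_iff_group s 6 _ (by decide) (by decide) (by decide)

-- the scan's final value: the least matched priority, or 7 when nothing matches
theorem pvScan_eq_of_least (nl : List Char) (p : Nat) (hp : p ≤ 6) (hc : pvP nl p)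
    (hprev : ∀ q, q < p → ¬ pvP nl q) :
    (PySem.List.pyRange 0 (nl.length : Int) 1).foldl (fun b i => pvInner nl i b) 7 = p := by
  rcases hc with ⟨kp, hkp, hpeq, i, hi, hsw⟩
  have hle := pvScan_mem_le nl _ i hi kp hkp hsw 7
  rcases pvScan_cases nl (PySem.List.pyRange 0 (nl.length : Int) 1) 7 with h | ⟨j, hj, kq, hkq, heq, hsw2⟩
  · omega
  · have hPB : pvP nl ((PySem.List.pyRange 0 (nl.length : Int) 1).foldl (fun b i => pvInner nl i b) 7) :=
      ⟨kq, hkq, heq, j, hj, hsw2⟩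
    by_cases hlt : (PySem.List.pyRange 0 (nl.length : Int) 1).foldl (fun b i => pvInner nl i b) 7 < p
    · exact absurd hPB (hprev _ hlt)
    · omega

theorem pvScan_eq_of_none (nl : List Char) (hnone : ∀ q, ¬ pvP nl q) :
    (PySem.List.pyRange 0 (nl.length : Int) 1).foldl (fun b i => pvInner nl i b) 7 = 7 := by
  rcases pvScan_cases nl (PySem.List.pyRange 0 (nl.length : Int) 1) 7 with h | ⟨j, hj, kq, hkq, heq, hsw2⟩
  · exact h
  · exact absurd ⟨kq, hkq, heq, j, hj, hsw2⟩ (hnone _)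

-- ===== VERDICT (by name: the statement is the Claim_ definition above) =====
theorem get_biome_type_py_spec : Claim_equal_get_biome_type_py := by
  intro map_name _
  unfold Spec_get_biome_type_py
  simp only [get_biome_type_py, get_biome_type_py_alt]
  have hlen : pvBiomes.length = 7 := rfl
  rw [hlen]
  set s := PySem.Str.lower map_name with hs
  by_cases h0 : (["forest", "jungle", "grove", "tree"] : List String).any (fun k => PySem.Str.isIn k s) = true
  · rw [if_pos h0, pvScan_eq_of_least s.toList 0 (by omega) ((pvP0_iff s).mpr h0) (by omega)]
    decide
  by_cases h1 : (["swamp", "bog", "marsh"] : List String).any (fun k => PySem.Str.isIn k s) = true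
  · rw [if_neg h0, if_pos h1, pvScan_eq_of_least s.toList 1 (by omega) ((pvP1_iff s).mpr h1) ?_]
    · decide
    · intro q hq; interval_cases q
      · exact fun h => h0 ((pvP0_iff s).mp h)
  by_cases h2 : (["plain", "valley", "field"] : List String).any (fun k => PySem.Str.isIn k s) = true
  · rw [if_neg h0, if_neg h1, if_pos h2, pvScan_eq_of_least s.toList 2 (by omega) ((pvP2_iff s).mpr h2) ?_]
    · decide
    · intro q hq; interval_cases q
      · exact fun h => h0 ((pvP0_iff s).mp h)
      · exact fun h => h1 ((pvP1_iff s).mp h)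
  by_cases h3 : (["mountain", "peak", "cliff"] : List String).any (fun k => PySem.Str.isIn k s) = true
  · rw [if_neg h0, if_neg h1, if_neg h2, if_pos h3, pvScan_eq_of_least s.toList 3 (by omega) ((pvP3_iff s).mpr h3) ?_]
    · decide
    · intro q hq; interval_cases q
      · exact fun h => h0 ((pvP0_iff s).mp h)
      · exact fun h => h1 ((pvP1_iff s).mp h)
      · exact fun h => h2 ((pvP2_iff s).mp h)
  by_cases h4 : (["cave", "cavern", "underground"] : List String).any (fun k => PySem.Str.isIn k s) = true
  · rw [if_neg h0, if_neg h1, if_neg h2, if_neg h3, if_pos h4, pvScan_eq_of_least s.toList 4 (by omega) ((pvP4_iff s).mpr h4) ?_]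
    · decide
    · intro q hq; interval_cases q
      · exact fun h => h0 ((pvP0_iff s).mp h)
      · exact fun h => h1 ((pvP1_iff s).mp h)
      · exact fun h => h2 ((pvP2_iff s).mp h)
      · exact fun h => h3 ((pvP3_iff s).mp h)
  by_cases h5 : (["water", "river", "lake", "lagoon"] : List String).any (fun k => PySem.Str.isIn k s) = true
  · rw [if_neg h0, if_neg h1, if_neg h2, if_neg h3, if_neg h4, if_pos h5, pvScan_eq_of_least s.toList 5 (by omega) ((pvP5_iff s).mpr h5) ?_]
    · decide
    · intro q hq; interval_cases q
      · exact fun h => h0 ((pvP0_iff s).mp h)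
      · exact fun h => h1 ((pvP1_iff s).mp h)
      · exact fun h => h2 ((pvP2_iff s).mp h)
      · exact fun h => h3 ((pvP3_iff s).mp h)
      · exact fun h => h4 ((pvP4_iff s).mp h)
  by_cases h6 : (["desert", "arid", "dry"] : List String).any (fun k => PySem.Str.isIn k s) = true
  · rw [if_neg h0, if_neg h1, if_neg h2, if_neg h3, if_neg h4, if_neg h5, if_pos h6, pvScan_eq_of_least s.toList 6 (by omega) ((pvP6_iff s).mpr h6) ?_]
    · decide
    · intro q hq; interval_cases q
      · exact fun h => h0 ((pvP0_iff s).mp h)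
      · exact fun h => h1 ((pvP1_iff s).mp h)
      · exact fun h => h2 ((pvP2_iff s).mp h)
      · exact fun h => h3 ((pvP3_iff s).mp h)
      · exact fun h => h4 ((pvP4_iff s).mp h)
      · exact fun h => h5 ((pvP5_iff s).mp h)
  · have hnone : ∀ q, ¬ pvP s.toList q := by
      intro q hPq
      have hall : ∀ kp ∈ pvKwPr, kp.2 ≤ 6 := by decide
      have hq6 : q ≤ 6 := by
        rcases hPq with ⟨kp, hkp, hpeq, -⟩
        have := hall kp hkp
        omega
      interval_cases q
      · exact h0 ((pvP0_iff s).mp hPq)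
      · exact h1 ((pvP1_iff s).mp hPq)
      · exact h2 ((pvP2_iff s).mp hPq)
      · exact h3 ((pvP3_iff s).mp hPq)
      · exact h4 ((pvP4_iff s).mp hPq)
      · exact h5 ((pvP5_iff s).mp hPq)
      · exact h6 ((pvP6_iff s).mp hPq)
    rw [if_neg h0, if_neg h1, if_neg h2, if_neg h3, if_neg h4, if_neg h5, if_neg h6,
      pvScan_eq_of_none s.toList hnone]
    decide
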